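-- pv_equiv track=rewrite | github.com/adelanavratova/Currency-converter | currency_converter.py | clue_amount
-- ===== SOURCE A (Python) =====
-- def clue_amount(word, content):
--     clue = set()
--
--     for i in range(len(word), 0, -1):
--         new_word = word[:i]
--
--         for prvek in content:
--             if new_word in prvek:
--                 clue.add(prvek)
--
--         if clue:
--             break
--
--     return clue
-- ===== SOURCE B (Python) =====
-- def clue_amount(word, content):
--     def ok(i):
--         p = word[:i]
--         return any(p in item for item in content)
--
--     if not word or not ok(1):
--         return set()
--     lo, hi = 1, len(word)
--     while lo < hi:
--         mid = (lo + hi + 1) // 2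
--         if ok(mid):
--             lo = mid
--         else:
--             hi = mid - 1
--     p = word[:lo]
--     return {item for item in content if p in item}
-- ===== Notes on version B (the rewrite author's own statement) =====
-- stated objective: faster
-- what changed: Replaces A's linear descent over prefix lengths (re-scanning all of content at each length) by a binary search for the longest matching prefix length — matchability is antitone in the length — followed by a single collection pass.
import Mathlib
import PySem

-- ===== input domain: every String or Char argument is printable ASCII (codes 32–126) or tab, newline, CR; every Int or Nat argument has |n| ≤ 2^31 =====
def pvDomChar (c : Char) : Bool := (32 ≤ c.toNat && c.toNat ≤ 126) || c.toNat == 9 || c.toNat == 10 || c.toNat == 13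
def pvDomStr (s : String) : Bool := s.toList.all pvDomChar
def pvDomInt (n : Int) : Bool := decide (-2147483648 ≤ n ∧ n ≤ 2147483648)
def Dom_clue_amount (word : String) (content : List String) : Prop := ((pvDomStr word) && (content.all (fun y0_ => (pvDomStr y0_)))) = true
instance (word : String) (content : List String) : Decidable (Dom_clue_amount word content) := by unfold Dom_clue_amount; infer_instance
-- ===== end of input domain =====

-- B replaces A's linear descent over prefix lengths by a binary search for the longest
-- matching prefix length (matchability is antitone in the length), then one collection pass.

-- ===== PORT A =====
-- the 'for i in range(len(word), 0, -1)' loop with its early 'break'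
def clue_amount.scan (word : String) (content : List String) : List Int → PySem.Set String → PySem.Set String
  | [], clue => clue
  | i :: rest, clue =>
      let new_word := PySem.Str.slice word none (some i)
      let clue' := content.foldl (fun c prvek => if PySem.Str.isIn new_word prvek then PySem.Set.add c prvek else c) clue
      if clue' ≠ [] then clue' else clue_amount.scan word content rest clue'

def clue_amount (word : String) (content : List String) : List String :=
  clue_amount.scan word content (PySem.List.pyRange (PySem.Str.len word) 0 (-1)) PySem.Set.empty

-- ===== PORT B =====
-- ok(i): does some content item contain word[:i]?
def clueOk (word : String) (content : List String) (i : Int) : Bool :=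
  content.any (fun item => PySem.Str.isIn (PySem.Str.slice word none (some i)) item)

-- the 'while lo < hi' binary search for the largest i with ok(i)
def clueSearch (word : String) (content : List String) (lo hi : Nat) : Nat :=
  if h : lo < hi then
    let mid := (lo + hi + 1) / 2
    if clueOk word content (mid : Int) then clueSearch word content mid hi
    else clueSearch word content lo (mid - 1)
  else lo
termination_by hi - lo
decreasing_by all_goals omega

def clue_amount_alt (word : String) (content : List String) : List String :=
  if PySem.Str.len word = 0 ∨ clueOk word content 1 = false then PySem.Set.empty
  else
    let lo := clueSearch word content 1 (PySem.Str.len word).toNat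
    PySem.Set.ofList (content.filter (fun item => PySem.Str.isIn (PySem.Str.slice word none (some (lo : Int))) item))

-- ===== PRECONDITION & SPEC =====
def Spec_clue_amount (word : String) (content : List String) (out : List String) : Prop := out = clue_amount_alt word content
instance (word : String) (content : List String) (out : List String) : Decidable (Spec_clue_amount word content out) := by unfold Spec_clue_amount; infer_instance

-- ===== CLAIM (what is proved, stated in full; the proofs are below) =====
def Claim_equal_clue_amount : Prop := ∀ (word : String) (content : List String), Dom_clue_amount word content → Spec_clue_amount word content (clue_amount word content)

-- ===== LEMMAS AND PROOFS =====

-- F word content k = the content items containing word[:k]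
def clueF (word : String) (content : List String) (k : Nat) : List String :=
  content.filter (fun item => PySem.Str.isIn (PySem.Str.slice word none (some (k : Int))) item)

-- A's descent, re-expressed as a Nat recursion (proved equal to clue_amount.scan below)
def clueA (word : String) (content : List String) : Nat → List String
  | 0 => []
  | k + 1 => if clueF word content (k + 1) ≠ [] then PySem.Set.ofList (clueF word content (k + 1)) else clueA word content k

theorem slice_toList_take (word : String) (k : Nat) :
    (PySem.Str.slice word none (some (k : Int))).toList = word.toList.take k := by
  simp [PySem.Str.toList_slice, PySem.Chars.slice_eq_listSlice, PySem.List.slice_to_natCast]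

-- monotonicity: a longer matching prefix implies the shorter one matches
theorem pred_mono (word item : String) {i j : Nat} (hij : i ≤ j)
    (h : PySem.Str.isIn (PySem.Str.slice word none (some (j : Int))) item = true) :
    PySem.Str.isIn (PySem.Str.slice word none (some (i : Int))) item = true := by
  rw [PySem.Str.isIn_iff_infix] at h ⊢
  rw [slice_toList_take] at h ⊢
  refine List.IsInfix.trans ?_ h
  have : word.toList.take i = (word.toList.take j).take i := by
    rw [List.take_take, Nat.min_eq_left hij]
  rw [this]
  exact (List.take_prefix _ _).isInfix

theorem clueOk_mono (word : String) (content : List String) {i j : Nat} (hij : i ≤ j)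
    (h : clueOk word content (j : Int) = true) : clueOk word content (i : Int) = true := by
  simp only [clueOk, List.any_eq_true] at h ⊢
  obtain ⟨x, hx, hp⟩ := h
  exact ⟨x, hx, pred_mono word x hij hp⟩

theorem clueOk_iff_F (word : String) (content : List String) (k : Nat) :
    clueOk word content (k : Int) = true ↔ clueF word content k ≠ [] := by
  simp only [clueOk, clueF, List.any_eq_true, Ne, List.filter_eq_nil_iff]
  push Not
  constructor
  · rintro ⟨x, hx, hp⟩; exact ⟨x, hx, hp⟩
  · rintro ⟨x, hx, hp⟩; exact ⟨x, hx, hp⟩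

theorem foldl_add_filter (content : List String) (p : String → Bool) :
    content.foldl (fun c prvek => if p prvek then PySem.Set.add c prvek else c) ([] : PySem.Set String)
      = PySem.Set.ofList (content.filter p) := by
  rw [PySem.Set.ofList_eq_foldl, ← List.foldl_filter]

theorem ofList_eq_nil_iff (xs : List String) : PySem.Set.ofList xs = ([] : List String) ↔ xs = [] := by
  constructor
  · intro h
    rw [List.eq_nil_iff_forall_not_mem]
    intro x hx
    have := (PySem.Set.mem_ofList xs x).mpr hx
    simp [h] at this
  · rintro rfl; rfl

-- A's loop equals the Nat recursion clueA
theorem scan_eq_clueA (word : String) (content : List String) (k : Nat) :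
    clue_amount.scan word content (PySem.List.pyRange (k : Int) 0 (-1)) PySem.Set.empty
      = clueA word content k := by
  induction k with
  | zero => rw [PySem.List.pyRange_neg_one_eq_nil (by omega)]; rfl
  | succ m ih =>
    rw [PySem.List.pyRange_neg_one_cons (by exact_mod_cast Nat.succ_pos m)]
    have hc : ((m + 1 : Nat) : Int) - 1 = (m : Int) := by push_cast; ring
    rw [clue_amount.scan, hc]
    simp only [PySem.Set.empty] at *
    rw [foldl_add_filter]
    rw [show (content.filter fun item =>
        PySem.Str.isIn (PySem.Str.slice word none (some ((m+1 : Nat) : Int))) item) = clueF word content (m+1) from rfl]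
    by_cases hF : clueF word content (m + 1) = []
    · simp [clueA, hF, ih]
    · simp [clueA, hF, (ofList_eq_nil_iff _).not.mpr hF]

-- binary-search correctness
theorem clueSearch_spec (word : String) (content : List String) :
    ∀ (d lo hi : Nat), hi - lo = d → lo ≤ hi → clueOk word content (lo : Int) = true →
      lo ≤ clueSearch word content lo hi ∧ clueSearch word content lo hi ≤ hi ∧
      clueOk word content ((clueSearch word content lo hi : Nat) : Int) = true ∧
      (∀ j : Nat, clueSearch word content lo hi < j → j ≤ hi → clueOk word content (j : Int) = false) := by
  intro d
  induction d using Nat.strong_induction_on with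
  | _ d ih =>
    intro lo hi hd hle hok
    rw [clueSearch]
    by_cases h : lo < hi
    · simp only [h, dif_pos]
      by_cases hm : clueOk word content (((lo + hi + 1) / 2 : Nat) : Int) = true
      · simp only [hm, if_pos]
        have := ih (hi - (lo + hi + 1) / 2) (by omega) ((lo + hi + 1) / 2) hi rfl (by omega) hm
        exact ⟨by omega, this.2.1, this.2.2.1, this.2.2.2⟩
      · simp only [hm, if_neg, Bool.not_eq_true]
        have := ih ((lo + hi + 1) / 2 - 1 - lo) (by omega) lo ((lo + hi + 1) / 2 - 1) rfl (by omega) hok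
        refine ⟨this.1, by omega, this.2.2.1, ?_⟩
        intro j hj1 hj2
        by_cases hj : j ≤ (lo + hi + 1) / 2 - 1
        · exact this.2.2.2 j hj1 hj
        · cases hcj : clueOk word content (j : Int) with
          | false => rfl
          | true =>
            exact absurd (clueOk_mono word content (i := (lo + hi + 1) / 2) (by omega) hcj) hm
    · simp only [h, dif_neg, not_false_iff]
      have : lo = hi := by omega
      exact ⟨le_refl _, hle, hok, fun j hj1 hj2 => by omega⟩

-- when no prefix length in [1,k] matches, A's descent yields []
theorem clueA_nil (word : String) (content : List String) (k : Nat)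
    (h : ∀ j : Nat, 1 ≤ j → j ≤ k → clueOk word content (j : Int) = false) :
    clueA word content k = [] := by
  induction k with
  | zero => rfl
  | succ m ih =>
    have hF : clueF word content (m + 1) = [] := by
      by_contra hF
      have := (clueOk_iff_F word content (m + 1)).mpr hF
      rw [h (m + 1) (by omega) (by omega)] at this; exact absurd this (by simp)
    simp only [clueA, hF, ne_eq, not_true_eq_false, if_neg, not_false_iff]
    exact ih (fun j h1 h2 => h j h1 (by omega))

-- above the maximum matching length r, A's descent is stuck at the collection for r
theorem clueA_eq_of_max (word : String) (content : List String) (r : Nat)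
    (hok : clueOk word content (r : Int) = true) (hr : 1 ≤ r) :
    ∀ k : Nat, r ≤ k → (∀ j : Nat, r < j → j ≤ k → clueOk word content (j : Int) = false) →
      clueA word content k = PySem.Set.ofList (clueF word content r) := by
  intro k
  induction k with
  | zero => intro h; omega
  | succ m ih =>
    intro hrk hnone
    by_cases heq : r = m + 1
    · subst heq
      have hF := (clueOk_iff_F word content (m + 1)).mp hok
      simp [clueA, hF]
    · have hlt : r ≤ m := by omega
      have hF : clueF word content (m + 1) = [] := by
        by_contra hF
        have := (clueOk_iff_F word content (m + 1)).mpr hF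
        rw [hnone (m + 1) (by omega) (by omega)] at this; exact absurd this (by simp)
      simp only [clueA, hF, ne_eq, not_true_eq_false, if_neg, not_false_iff]
      exact ih hlt (fun j h1 h2 => hnone j h1 (by omega))

-- ===== VERDICT (by name: the statement is the Claim_ definition above) =====
theorem clue_amount_spec : Claim_equal_clue_amount := by
  intro word content _
  unfold Spec_clue_amount clue_amount clue_amount_alt
  have hlen : PySem.Str.len word = ((word.toList.length : Nat) : Int) := by
    simp [PySem.Str.len_eq]
  set n := word.toList.length with hn
  rw [hlen, scan_eq_clueA]
  by_cases h0 : ((n : Int) = 0 ∨ clueOk word content 1 = false)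
  · rw [if_pos h0]
    rcases h0 with h0 | h0
    · have hz : n = 0 := by exact_mod_cast h0
      rw [hz]; rfl
    · refine clueA_nil word content n (fun j h1 _ => ?_)
      cases hc : clueOk word content (j : Int) with
      | false => rfl
      | true =>
        have h1' := clueOk_mono word content (i := 1) h1 hc
        rw [show ((1:Nat):Int) = 1 by norm_num, h0] at h1'
        exact absurd h1' (by simp)
  · rw [if_neg h0]
    have hok1 : clueOk word content 1 = true := by
      cases hc : clueOk word content 1 with
      | true => rfl
      | false => exact absurd (Or.inr hc) h0
    have hne : n ≠ 0 := fun h => h0 (Or.inl (by exact_mod_cast h))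
    have hok1' : clueOk word content ((1:Nat):Int) = true := by
      rwa [show ((1:Nat):Int) = 1 by norm_num]
    have hs := clueSearch_spec word content (n - 1) 1 n rfl (by omega) hok1'
    rw [show ((n : Int)).toNat = n by simp]
    rw [clueA_eq_of_max word content (clueSearch word content 1 n) hs.2.2.1 hs.1 n hs.2.1 hs.2.2.2]
    simp [clueF]
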